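-- pv_equiv track=rewrite | github.com/abhihjoshi/cos551-final-project | analysis/fasta_acgtn_frequency.py | count_interval_frequency
-- ===== SOURCE A (Python) =====
-- from collections import defaultdict
--
-- def count_interval_frequency(sequence, start, end):
--     """
--     Returns the frequency of the bases within a given range
--     """
--     counts = defaultdict(int)
--     assert start < end
--     segment = sequence[start:end]
--     for nucleotide in segment:
--         n = nucleotide.upper()
--         if n in set(["A", "C", "T", "G"]):
--             counts[n] += 1
--         else:
--             counts["N"] += 1
--
--     return counts
-- ===== SOURCE B (Python) =====
-- from collections import defaultdict
--
-- def count_interval_frequency(sequence, start, end):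
--     """
--     Returns the frequency of the bases within a given range
--     """
--     assert start < end
--     classified = [c.upper() if c.upper() in ("A", "C", "G", "T") else "N"
--                   for c in sequence[start:end]]
--     counts = defaultdict(int)
--     for base in dict.fromkeys(classified):
--         counts[base] = classified.count(base)
--     return counts
-- ===== Notes on version B (the rewrite author's own statement) =====
-- stated objective: alternative
-- what changed: A counts incrementally with a per-character defaultdict update; B first maps the segment to its classified symbols, then builds the dict per distinct symbol (dict.fromkeys for first-occurrence order) with list.count, so the incremental accumulation disappears.
import Mathlib
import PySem

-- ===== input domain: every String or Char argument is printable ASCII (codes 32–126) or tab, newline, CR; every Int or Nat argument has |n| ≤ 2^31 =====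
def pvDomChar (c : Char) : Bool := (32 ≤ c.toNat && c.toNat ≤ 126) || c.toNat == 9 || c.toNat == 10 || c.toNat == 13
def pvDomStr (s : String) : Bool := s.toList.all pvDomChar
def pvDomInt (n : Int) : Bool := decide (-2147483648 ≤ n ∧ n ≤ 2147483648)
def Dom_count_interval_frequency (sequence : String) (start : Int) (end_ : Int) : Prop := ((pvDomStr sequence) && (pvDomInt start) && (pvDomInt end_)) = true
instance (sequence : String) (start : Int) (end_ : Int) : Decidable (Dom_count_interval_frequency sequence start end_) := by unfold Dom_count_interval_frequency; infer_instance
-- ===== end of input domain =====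

-- B replaces A's incremental per-character counting by a classify-then-count-per-distinct-symbol
-- decomposition (alternative structure, same cost class).


-- ===== PORT A =====
def count_interval_frequency (sequence : String) (start : Int) (end_ : Int) : List (String × Int) :=
  let segment := PySem.List.slice sequence.toList (some start) (some end_)
  let counts := segment.foldl (fun counts nucleotide =>
      let n := String.ofList (PySem.Chars.upper [nucleotide])
      if n ∈ PySem.Set.ofList ["A", "C", "T", "G"] then
        counts.insert n (counts.getD n 0 + 1)
      else
        counts.insert "N" (counts.getD "N" 0 + 1)) PySem.Dict.empty
  counts.items

-- ===== PORT B =====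
def count_interval_frequency_alt (sequence : String) (start : Int) (end_ : Int) : List (String × Int) :=
  let classified := (PySem.List.slice sequence.toList (some start) (some end_)).map (fun c =>
      if String.ofList (PySem.Chars.upper [c]) = "A" ∨ String.ofList (PySem.Chars.upper [c]) = "C" ∨
         String.ofList (PySem.Chars.upper [c]) = "G" ∨ String.ofList (PySem.Chars.upper [c]) = "T"
      then String.ofList (PySem.Chars.upper [c]) else "N")
  let counts := (PySem.List.dedup classified).foldl
      (fun counts base => counts.insert base ((classified.count base : Int))) PySem.Dict.empty
  counts.items

-- ===== PRECONDITION & SPEC =====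
-- Pre_ excludes exactly the inputs where A's 'assert start < end' raises AssertionError.
def Pre_count_interval_frequency (sequence : String) (start : Int) (end_ : Int) : Prop := start < end_
instance (sequence : String) (start : Int) (end_ : Int) : Decidable (Pre_count_interval_frequency sequence start end_) := by unfold Pre_count_interval_frequency; infer_instance

def pvWitness_count_interval_frequency : String × Int × Int := ("AcG t!", 0, 6)

def Spec_count_interval_frequency (sequence : String) (start : Int) (end_ : Int) (out : List (String × Int)) : Prop := out = count_interval_frequency_alt sequence start end_
instance (sequence : String) (start : Int) (end_ : Int) (out : List (String × Int)) : Decidable (Spec_count_interval_frequency sequence start end_ out) := by unfold Spec_count_interval_frequency; infer_instance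

-- ===== CLAIM (what is proved, stated in full; the proofs are below) =====
def Claim_equal_count_interval_frequency : Prop := ∀ (sequence : String) (start : Int) (end_ : Int), Dom_count_interval_frequency sequence start end_ → Pre_count_interval_frequency sequence start end_ → Spec_count_interval_frequency sequence start end_ (count_interval_frequency sequence start end_)

-- ===== LEMMAS AND PROOFS =====

-- the classified symbol of one character, shared shape of both ports' branches
def pvKey (c : Char) : String :=
  if String.ofList (PySem.Chars.upper [c]) ∈ PySem.Set.ofList ["A", "C", "T", "G"] then
    String.ofList (PySem.Chars.upper [c])
  else "N"

lemma pvKey_eq_keyB (c : Char) :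
    (if String.ofList (PySem.Chars.upper [c]) = "A" ∨ String.ofList (PySem.Chars.upper [c]) = "C" ∨
        String.ofList (PySem.Chars.upper [c]) = "G" ∨ String.ofList (PySem.Chars.upper [c]) = "T"
     then String.ofList (PySem.Chars.upper [c]) else "N") = pvKey c := by
  unfold pvKey
  refine if_congr ?_ rfl rfl
  simp [PySem.Set.mem_ofList]
  tauto

lemma pvA_eq_counter (l : List Char) :
    l.foldl (fun counts nucleotide =>
        let n := String.ofList (PySem.Chars.upper [nucleotide])
        if n ∈ PySem.Set.ofList ["A", "C", "T", "G"] then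
          counts.insert n (counts.getD n 0 + 1)
        else
          counts.insert "N" (counts.getD "N" 0 + 1)) PySem.Dict.empty
      = PySem.Dict.counter (l.map pvKey) := by
  rw [← PySem.Dict.foldl_insert_getD_add_one_eq_counter, List.foldl_map]
  congr 1
  funext d c
  simp only [pvKey]
  by_cases h : String.ofList (PySem.Chars.upper [c]) ∈ PySem.Set.ofList ["A", "C", "T", "G"] <;>
    simp [h]

lemma pvB_items (zs : List String) :
    ((PySem.List.dedup zs).foldl
        (fun counts base => counts.insert base ((zs.count base : Int))) PySem.Dict.empty).items
      = (PySem.Set.ofList zs).map (fun k => (k, (zs.count k : Int))) := by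
  have h := PySem.Dict.items_foldl_insert_fresh (PySem.List.dedup zs)
      (fun a => a) (fun a => (zs.count a : Int)) PySem.Dict.empty
      (by intro a _; simp [PySem.Dict.contains_empty])
      (by
        simp only [List.map_id']
        exact PySem.Set.nodup_ofList zs)
  simpa using h

-- ===== VERDICT (by name: the statement is the Claim_ definition above) =====
theorem count_interval_frequency_spec : Claim_equal_count_interval_frequency := by
  intro sequence start end_ _ _
  unfold Spec_count_interval_frequency count_interval_frequency count_interval_frequency_alt
  simp only
  rw [pvA_eq_counter, PySem.Dict.items_counter]
  have hmap : (PySem.List.slice sequence.toList (some start) (some end_)).map (fun c =>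
      if String.ofList (PySem.Chars.upper [c]) = "A" ∨ String.ofList (PySem.Chars.upper [c]) = "C" ∨
         String.ofList (PySem.Chars.upper [c]) = "G" ∨ String.ofList (PySem.Chars.upper [c]) = "T"
      then String.ofList (PySem.Chars.upper [c]) else "N")
      = (PySem.List.slice sequence.toList (some start) (some end_)).map pvKey := by
    apply List.map_congr_left
    intro c _
    exact pvKey_eq_keyB c
  rw [hmap, pvB_items]
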